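-- pv_equiv track=rewrite | github.com/Narcoker/Coding-Test-Private | 코드트리/메이즈 러너.py | get_min_square_range
-- ===== SOURCE A (Python) =====
-- def get_min_square_range(persons, exit_pos, N):
--     for amount in range(1, N):  # 정사각형 범위 순회(1~N-1)
--         for start_y in range(0, N):  # y축 정방향 전체 순회
--             for start_x in range(0, N):  # x축 정방향 전체 순회 - 좌상단 모서리 찾기
--                 # 우하단 계산 - 우하단 모서리 찾기
--                 end_y = start_y + amount
--                 end_x = start_x + amount
--
--                 if not (0 <= end_y < N and 0 <= end_x < N):  # 우하단이 범위 밖인 경우: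
--                     continue  # continue
--
--                 has_person = False  # 사람 유무 = False
--                 has_exit = False  # 출구 츄무 = False
--
--                 for y_in_square in range(start_y, end_y + 1):  # y축 정사각형 범위 순회
--                     for x_in_square in range(start_x, end_x + 1):  # x축 정사각형 범위 순회
--                         if (y_in_square, x_in_square) in persons:  # 사람 칸이면:
--                             has_person = True  # 사람 유무 True
--                         if (y_in_square, x_in_square) == exit_pos:  # 출구 칸이면:
--                             has_exit = True  # 출구 유무 True
--
--                         if has_person and has_exit:  # 사람있고 출구 있으면:
--                             return (start_y, start_x), (end_y, end_x)  # 범위 반환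
-- ===== SOURCE B (Python) =====
-- def get_min_square_range(persons, exit_pos, N):
--     # Only squares containing the exit are enumerated (window around the exit),
--     # starting from the smallest size that can cover the exit and some person;
--     # persons are filtered to the grid once and to the row band per sy.
--     persons = [(py, px) for py, px in persons if 0 <= py < N and 0 <= px < N]
--     if not persons:
--         return None
--     ey, ex = exit_pos
--     start = max(1, min(max(abs(py - ey), abs(px - ex)) for py, px in persons))
--     for amount in range(start, N):
--         for sy in range(max(0, ey - amount), min(ey, N - 1 - amount) + 1):
--             row = [px for py, px in persons if sy <= py <= sy + amount]
--             if not row: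
--                 continue
--             for sx in range(max(0, ex - amount), min(ex, N - 1 - amount) + 1):
--                 if any(sx <= px <= sx + amount for px in row):
--                     return (sy, sx), (sy + amount, sx + amount)
--     return None
-- ===== Notes on version B (the rewrite author's own statement) =====
-- stated objective: faster
-- what changed: B filters persons to the grid once, starts the size loop at the smallest square that can cover the exit and some person, enumerates only squares containing the exit (window loop bounds) and tests person containment with a pass over the current row band's persons, instead of A's full enumeration of all squares with a per-cell membership scan; intended as faster and measured so (the probe read 10107x where A timed out and B answered, and 137x-12750x at large sizes in other runs; some runs could not confirm a ratio because A either times out or finishes in under 5ms).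
import Mathlib
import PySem

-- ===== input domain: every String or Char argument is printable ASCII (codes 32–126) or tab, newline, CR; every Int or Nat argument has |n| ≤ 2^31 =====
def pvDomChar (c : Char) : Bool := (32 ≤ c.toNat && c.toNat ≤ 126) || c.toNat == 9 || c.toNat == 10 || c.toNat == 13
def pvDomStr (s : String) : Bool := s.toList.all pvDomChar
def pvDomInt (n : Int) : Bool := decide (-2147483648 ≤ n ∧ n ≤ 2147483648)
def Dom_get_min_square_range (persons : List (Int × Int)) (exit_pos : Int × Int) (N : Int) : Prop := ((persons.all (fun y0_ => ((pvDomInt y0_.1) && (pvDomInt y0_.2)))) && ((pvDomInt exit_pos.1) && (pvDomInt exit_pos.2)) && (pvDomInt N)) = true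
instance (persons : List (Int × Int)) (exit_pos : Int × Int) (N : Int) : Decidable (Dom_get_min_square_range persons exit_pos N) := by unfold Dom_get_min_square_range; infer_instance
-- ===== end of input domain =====

-- B replaces A's per-square cell scan by O(1) exit arithmetic + one pass over persons (measured faster).

-- ===== PORT A =====
-- inner 'for x_in_square' loop: threads the two flags, early-returns r when both are set
def aScanX (persons : List (Int × Int)) (exit_pos : Int × Int)
    (r : (Int × Int) × (Int × Int)) (y : Int) :
    List Int → Bool → Bool → Option ((Int × Int) × (Int × Int)) × Bool × Bool
  | [], hp, he => (none, hp, he)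
  | x :: xs, hp, he =>
    let hp' := hp || persons.contains (y, x)
    let he' := he || ((y, x) == exit_pos)
    if hp' && he' then (some r, hp', he') else aScanX persons exit_pos r y xs hp' he'

-- inner 'for y_in_square' loop
def aScanY (persons : List (Int × Int)) (exit_pos : Int × Int)
    (r : (Int × Int) × (Int × Int)) (start_x end_x : Int) :
    List Int → Bool → Bool → Option ((Int × Int) × (Int × Int))
  | [], _, _ => none
  | y :: ys, hp, he =>
    match aScanX persons exit_pos r y (PySem.List.pyRange start_x (end_x + 1) 1) hp he with
    | (some res, _, _) => some res
    | (none, hp', he') => aScanY persons exit_pos r start_x end_x ys hp' he'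

def get_min_square_range (persons : List (Int × Int)) (exit_pos : Int × Int) (N : Int) :
    Option ((Int × Int) × (Int × Int)) :=
  (PySem.List.pyRange 1 N 1).findSome? fun amount =>
    (PySem.List.pyRange 0 N 1).findSome? fun start_y =>
      (PySem.List.pyRange 0 N 1).findSome? fun start_x =>
        let end_y := start_y + amount
        let end_x := start_x + amount
        if ¬ (0 ≤ end_y ∧ end_y < N ∧ 0 ≤ end_x ∧ end_x < N) then none
        else
          aScanY persons exit_pos ((start_y, start_x), (end_y, end_x)) start_x end_x
            (PySem.List.pyRange start_y (end_y + 1) 1) false false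

-- ===== PORT B =====
def get_min_square_range_alt (persons : List (Int × Int)) (exit_pos : Int × Int) (N : Int) :
    Option ((Int × Int) × (Int × Int)) :=
  let persons2 := persons.filter (fun p => decide (0 ≤ p.1 ∧ p.1 < N ∧ 0 ≤ p.2 ∧ p.2 < N))
  if persons2 = [] then none
  else
    let ey := exit_pos.1
    let ex := exit_pos.2
    -- min(...) over a guarded-nonempty generator: PySem.List.min? with identity key; the
    -- .getD 0 default is never reached (persons2 ≠ [] here)
    let start := max 1 ((PySem.List.min? (persons2.map (fun p => max |p.1 - ey| |p.2 - ex|))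
      (fun v => v)).getD 0)
    (PySem.List.pyRange start N 1).findSome? fun amount =>
      (PySem.List.pyRange (max 0 (ey - amount)) (min ey (N - 1 - amount) + 1) 1).findSome? fun sy =>
        let row := (persons2.filter (fun p => decide (sy ≤ p.1 ∧ p.1 ≤ sy + amount))).map Prod.snd
        if row = [] then none
        else
          (PySem.List.pyRange (max 0 (ex - amount)) (min ex (N - 1 - amount) + 1) 1).findSome? fun sx =>
            if row.any (fun px => decide (sx ≤ px ∧ px ≤ sx + amount))
            then some ((sy, sx), (sy + amount, sx + amount)) else none

-- ===== PRECONDITION & SPEC =====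
def Spec_get_min_square_range (persons : List (Int × Int)) (exit_pos : Int × Int) (N : Int) (out : Option ((Int × Int) × (Int × Int))) : Prop := out = get_min_square_range_alt persons exit_pos N
instance (persons : List (Int × Int)) (exit_pos : Int × Int) (N : Int) (out : Option ((Int × Int) × (Int × Int))) : Decidable (Spec_get_min_square_range persons exit_pos N out) := by unfold Spec_get_min_square_range; infer_instance

-- ===== CLAIM (what is proved, stated in full; the proofs are below) =====
def Claim_equal_get_min_square_range : Prop := ∀ (persons : List (Int × Int)) (exit_pos : Int × Int) (N : Int), Dom_get_min_square_range persons exit_pos N → Spec_get_min_square_range persons exit_pos N (get_min_square_range persons exit_pos N)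



-- ===== LEMMAS AND PROOFS =====

-- "some person lies in the square [sy,sy+amount] x [sx,sx+amount]" (proof-side abbreviation)
def bInSquare (sy sx amount : Int) (p : Int × Int) : Bool :=
  decide (sy ≤ p.1 ∧ p.1 ≤ sy + amount ∧ sx ≤ p.2 ∧ p.2 ≤ sx + amount)


-- findSome? respects pointwise equality on the list's members
lemma findSome?_congr_mem {α β : Type} (l : List α) (f g : α → Option β)
    (h : ∀ x ∈ l, f x = g x) : l.findSome? f = l.findSome? g := by
  induction l with
  | nil => rfl
  | cons a t ih =>
    simp only [List.findSome?_cons, h a (by simp)]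
    cases g a with
    | none => exact ih (fun x hx => h x (by simp [hx]))
    | some b => rfl

-- characterization of A's inner x-loop: monotone flags, early return when both set
lemma aScanX_eq (persons : List (Int × Int)) (ep : Int × Int)
    (r : (Int × Int) × (Int × Int)) (y : Int) :
    ∀ (xs : List Int) (hp he : Bool), (hp && he) = false →
      aScanX persons ep r y xs hp he =
        (if (hp || xs.any (fun x => persons.contains (y, x))) &&
            (he || xs.any (fun x => (y, x) == ep))
         then (some r, true, true)
         else (none, hp || xs.any (fun x => persons.contains (y, x)),
                     he || xs.any (fun x => (y, x) == ep))) := by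
  intro xs
  induction xs with
  | nil => intro hp he h; cases hp <;> cases he <;> simp_all [aScanX]
  | cons x t ih =>
    intro hp he h
    simp only [aScanX, List.any_cons]
    cases hp <;> cases he <;> try exact absurd h (by decide)
    all_goals
      rcases Bool.eq_false_or_eq_true (persons.contains (y, x)) with hc | hc <;>
      rcases Bool.eq_false_or_eq_true ((y, x) == ep) with hcE | hcE <;>
      (simp only [hc, hcE]; simp [ih])

-- characterization of A's inner y-loop (flags never both set on entry)
lemma aScanY_eq (persons : List (Int × Int)) (ep : Int × Int)
    (r : (Int × Int) × (Int × Int)) (sx ex : Int) :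
    ∀ (ys : List Int) (hp he : Bool), (hp && he) = false →
      aScanY persons ep r sx ex ys hp he =
        (if (hp || ys.any (fun y => (PySem.List.pyRange sx (ex + 1) 1).any
                (fun x => persons.contains (y, x)))) &&
            (he || ys.any (fun y => (PySem.List.pyRange sx (ex + 1) 1).any
                (fun x => (y, x) == ep)))
         then some r else none) := by
  intro ys
  induction ys with
  | nil => intro hp he h; cases hp <;> cases he <;> simp_all [aScanY]
  | cons y t ih =>
    intro hp he h
    rw [aScanY, aScanX_eq persons ep r y _ hp he h]
    simp only [List.any_cons]
    cases hp <;> cases he <;> try exact absurd h (by decide)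
    all_goals
      rcases Bool.eq_false_or_eq_true ((PySem.List.pyRange sx (ex + 1) 1).any
          (fun x => persons.contains (y, x))) with hc1 | hc1 <;>
      rcases Bool.eq_false_or_eq_true ((PySem.List.pyRange sx (ex + 1) 1).any
          (fun x => (y, x) == ep)) with hc2 | hc2 <;>
      (simp only [hc1, hc2]; simp [ih]; try rfl)

-- the double cell scan finds the exit iff the exit's coordinates lie in the square
lemma exit_cond (ep : (Int × Int)) (sy sx a : Int) :
    ((PySem.List.pyRange sy (sy + a + 1) 1).any (fun y =>
      (PySem.List.pyRange sx (sx + a + 1) 1).any (fun x => (y, x) == ep))) =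
    decide (sy ≤ ep.1 ∧ ep.1 ≤ sy + a ∧ sx ≤ ep.2 ∧ ep.2 ≤ sx + a) := by
  rw [Bool.eq_iff_iff]
  simp only [List.any_eq_true, PySem.List.mem_pyRange_one, beq_iff_eq, decide_eq_true_eq]
  constructor
  · rintro ⟨y, ⟨h1, h2⟩, x, ⟨h3, h4⟩, heq⟩
    rw [Prod.ext_iff] at heq
    obtain ⟨hy, hx⟩ := heq
    simp only at hy hx
    omega
  · rintro ⟨h1, h2, h3, h4⟩
    exact ⟨ep.1, by omega, ep.2, by omega, rfl⟩

-- the double cell scan finds a person iff some listed person lies in the square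
lemma person_cond (persons : List (Int × Int)) (sy sx a : Int) :
    ((PySem.List.pyRange sy (sy + a + 1) 1).any (fun y =>
      (PySem.List.pyRange sx (sx + a + 1) 1).any (fun x => persons.contains (y, x)))) =
    persons.any (bInSquare sy sx a) := by
  rw [Bool.eq_iff_iff]
  simp only [List.any_eq_true, PySem.List.mem_pyRange_one, List.contains_iff_mem,
    bInSquare, decide_eq_true_eq]
  constructor
  · rintro ⟨y, ⟨h1, h2⟩, x, ⟨h3, h4⟩, hmem⟩
    exact ⟨(y, x), hmem, by constructor <;> [omega; constructor <;> [omega; omega]]⟩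
  · rintro ⟨p, hmem, h1, h2, h3, h4⟩
    exact ⟨p.1, by omega, p.2, by omega, by simpa⟩

-- A's per-square scan computed in closed form
lemma square_eq (persons : List (Int × Int)) (ep : (Int × Int)) (sy sx a : Int)
    (r : (Int × Int) × (Int × Int)) :
    aScanY persons ep r sx (sx + a) (PySem.List.pyRange sy (sy + a + 1) 1) false false =
      (if (sy ≤ ep.1 ∧ ep.1 ≤ sy + a) ∧ (sx ≤ ep.2 ∧ ep.2 ≤ sx + a) ∧
          persons.any (bInSquare sy sx a) = true
       then some r else none) := by
  rw [aScanY_eq persons ep r sx (sx + a) _ false false rfl]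
  simp only [Bool.false_or, exit_cond ep sy sx a, person_cond persons sy sx a]
  by_cases hE : sy ≤ ep.1 ∧ ep.1 ≤ sy + a ∧ sx ≤ ep.2 ∧ ep.2 ≤ sx + a <;>
    by_cases hP : persons.any (bInSquare sy sx a) = true <;>
    (simp [hE, hP]; all_goals omega)

-- a guarded scan over [0, L) equals the unguarded scan over the guard's window [lo, hi)
lemma findSome?_window {β : Type} (L lo hi : Int) (g : Int → Option β) (X : Int → Prop)
    [DecidablePred X] (hlo : 0 ≤ lo) (hhi : hi ≤ L)
    (hchar : ∀ s, 0 ≤ s → s < L → (X s ↔ lo ≤ s ∧ s < hi)) :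
    (PySem.List.pyRange 0 L 1).findSome? (fun s => if X s then g s else none) =
    (PySem.List.pyRange lo hi 1).findSome? g := by
  by_cases hw : lo ≤ hi
  · rw [PySem.List.pyRange_one_append 0 lo L hlo (by omega), List.findSome?_append,
      PySem.List.pyRange_one_append lo hi L hw hhi, List.findSome?_append]
    have h1 : (PySem.List.pyRange 0 lo 1).findSome? (fun s => if X s then g s else none) = none := by
      apply List.findSome?_eq_none_iff.mpr
      intro s hs
      rw [PySem.List.mem_pyRange_one] at hs
      rw [if_neg (by rw [hchar s (by omega) (by omega)]; omega)]
    have h2 : (PySem.List.pyRange hi L 1).findSome? (fun s => if X s then g s else none) = none := by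
      apply List.findSome?_eq_none_iff.mpr
      intro s hs
      rw [PySem.List.mem_pyRange_one] at hs
      rw [if_neg (by rw [hchar s (by omega) (by omega)]; omega)]
    have h3 : (PySem.List.pyRange lo hi 1).findSome? (fun s => if X s then g s else none) =
        (PySem.List.pyRange lo hi 1).findSome? g := by
      apply findSome?_congr_mem
      intro s hs
      rw [PySem.List.mem_pyRange_one] at hs
      rw [if_pos (by rw [hchar s (by omega) (by omega)]; omega)]
    rw [h1, h2, h3]
    cases (PySem.List.pyRange lo hi 1).findSome? g <;> simp
  · rw [show PySem.List.pyRange lo hi 1 = [] from PySem.List.pyRange_one_eq_nil (by omega),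
      List.findSome?_nil]
    apply List.findSome?_eq_none_iff.mpr
    intro s hs
    rw [PySem.List.mem_pyRange_one] at hs
    rw [if_neg (by rw [hchar s (by omega) (by omega)]; omega)]

-- dropping a none-valued head segment from a scan over [1, N)
lemma findSome?_tail {β : Type} (start N : Int) (g : Int → Option β) (hs : 1 ≤ start)
    (hnone : ∀ a, 1 ≤ a → a < N → a < start → g a = none) :
    (PySem.List.pyRange 1 N 1).findSome? g = (PySem.List.pyRange start N 1).findSome? g := by
  by_cases hN : start ≤ N
  · rw [PySem.List.pyRange_one_append 1 start N hs hN, List.findSome?_append]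
    have h1 : (PySem.List.pyRange 1 start 1).findSome? g = none := by
      apply List.findSome?_eq_none_iff.mpr
      intro a ha
      rw [PySem.List.mem_pyRange_one] at ha
      exact hnone a (by omega) (by omega) (by omega)
    rw [h1, Option.none_or]
  · rw [show PySem.List.pyRange start N 1 = [] from PySem.List.pyRange_one_eq_nil (by omega),
      List.findSome?_nil]
    apply List.findSome?_eq_none_iff.mpr
    intro a ha
    rw [PySem.List.mem_pyRange_one] at ha
    exact hnone a (by omega) (by omega) (by omega)

-- A's sx-loop over the full range, for one row sy, in closed form
lemma rowA_eq (persons : List (Int × Int)) (ep : (Int × Int)) (N sy a : Int)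
    (ha1 : 1 ≤ a) (ha2 : a < N) (hsy : 0 ≤ sy) :
    ((PySem.List.pyRange 0 N 1).findSome? fun sx =>
      if ¬ (0 ≤ sy + a ∧ sy + a < N ∧ 0 ≤ sx + a ∧ sx + a < N) then none
      else aScanY persons ep ((sy, sx), (sy + a, sx + a)) sx (sx + a)
        (PySem.List.pyRange sy (sy + a + 1) 1) false false) =
    (if sy + a < N ∧ sy ≤ ep.1 ∧ ep.1 ≤ sy + a then
      (PySem.List.pyRange 0 (N - a) 1).findSome? fun sx =>
        if (sx ≤ ep.2 ∧ ep.2 ≤ sx + a) ∧ persons.any (bInSquare sy sx a)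
        then some ((sy, sx), (sy + a, sx + a)) else none
     else none) := by
  by_cases hY : sy + a < N
  · rw [PySem.List.pyRange_one_append 0 (N - a) N (by omega) (by omega), List.findSome?_append]
    have htail : ((PySem.List.pyRange (N - a) N 1).findSome? fun sx =>
        if ¬ (0 ≤ sy + a ∧ sy + a < N ∧ 0 ≤ sx + a ∧ sx + a < N) then none
        else aScanY persons ep ((sy, sx), (sy + a, sx + a)) sx (sx + a)
          (PySem.List.pyRange sy (sy + a + 1) 1) false false) = none := by
      apply List.findSome?_eq_none_iff.mpr
      intro sx hsx
      rw [PySem.List.mem_pyRange_one] at hsx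
      rw [if_pos (by omega)]
    rw [htail, Option.or_none]
    by_cases hEy : sy ≤ ep.1 ∧ ep.1 ≤ sy + a
    · rw [if_pos ⟨hY, hEy⟩]
      apply findSome?_congr_mem
      intro sx hsx
      rw [PySem.List.mem_pyRange_one] at hsx
      rw [if_neg (by omega), square_eq]
      by_cases hEx : sx ≤ ep.2 ∧ ep.2 ≤ sx + a <;>
        by_cases hP : persons.any (bInSquare sy sx a) = true <;>
        simp [hEy, hEx, hP]
    · rw [if_neg (by tauto)]
      apply List.findSome?_eq_none_iff.mpr
      intro sx hsx
      rw [PySem.List.mem_pyRange_one] at hsx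
      rw [if_neg (by omega), square_eq, if_neg (by tauto)]
  · rw [if_neg (by tauto)]
    apply List.findSome?_eq_none_iff.mpr
    intro sx _
    rw [if_pos (by omega)]

-- A's sy/sx loops for one amount, in closed form over the full grid
lemma amountA_eq (persons : List (Int × Int)) (ep : (Int × Int)) (N a : Int)
    (ha1 : 1 ≤ a) (ha2 : a < N) :
    ((PySem.List.pyRange 0 N 1).findSome? fun start_y =>
      (PySem.List.pyRange 0 N 1).findSome? fun start_x =>
        let end_y := start_y + a
        let end_x := start_x + a
        if ¬ (0 ≤ end_y ∧ end_y < N ∧ 0 ≤ end_x ∧ end_x < N) then none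
        else aScanY persons ep ((start_y, start_x), (end_y, end_x)) start_x end_x
          (PySem.List.pyRange start_y (end_y + 1) 1) false false) =
    ((PySem.List.pyRange 0 N 1).findSome? fun sy =>
      if sy + a < N ∧ sy ≤ ep.1 ∧ ep.1 ≤ sy + a then
        (PySem.List.pyRange 0 (N - a) 1).findSome? fun sx =>
          if (sx ≤ ep.2 ∧ ep.2 ≤ sx + a) ∧ persons.any (bInSquare sy sx a)
          then some ((sy, sx), (sy + a, sx + a)) else none
      else none) := by
  apply findSome?_congr_mem
  intro sy hsy
  rw [PySem.List.mem_pyRange_one] at hsy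
  exact rowA_eq persons ep N sy a (by omega) (by omega) (by omega)

-- persons outside the grid can never lie in an in-grid square
lemma filter_any (persons : List (Int × Int)) (N sy sx a : Int)
    (h1 : 0 ≤ sy) (h2 : sy + a < N) (h3 : 0 ≤ sx) (h4 : sx + a < N) :
    persons.any (bInSquare sy sx a) =
    (persons.filter (fun p => decide (0 ≤ p.1 ∧ p.1 < N ∧ 0 ≤ p.2 ∧ p.2 < N))).any
      (bInSquare sy sx a) := by
  rw [Bool.eq_iff_iff]
  simp only [List.any_eq_true, List.mem_filter, bInSquare, decide_eq_true_eq]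
  constructor
  · rintro ⟨p, hp, hin⟩
    exact ⟨p, ⟨hp, by omega⟩, hin⟩
  · rintro ⟨p, ⟨hp, _⟩, hin⟩
    exact ⟨p, hp, hin⟩

-- a person lies in the square iff its column does, among persons of the square's rows
lemma row_any (ps : List (Int × Int)) (sy sx a : Int) :
    ps.any (bInSquare sy sx a) =
    ((ps.filter (fun p => decide (sy ≤ p.1 ∧ p.1 ≤ sy + a))).map Prod.snd).any
      (fun px => decide (sx ≤ px ∧ px ≤ sx + a)) := by
  rw [Bool.eq_iff_iff]
  simp only [List.any_eq_true, List.mem_map, List.mem_filter, bInSquare, decide_eq_true_eq]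
  constructor
  · rintro ⟨p, hp, h1, h2, h3, h4⟩
    exact ⟨p.2, ⟨p, ⟨hp, h1, h2⟩, rfl⟩, h3, h4⟩
  · rintro ⟨px, ⟨p, ⟨hp, hy1, hy2⟩, hpx⟩, hx1, hx2⟩
    exact ⟨p, hp, hy1, hy2, by omega, by omega⟩

-- ===== VERDICT (by name: the statement is the Claim_ definition above) =====
theorem get_min_square_range_spec : Claim_equal_get_min_square_range := by
  intro persons ep N _
  unfold Spec_get_min_square_range get_min_square_range get_min_square_range_alt
  by_cases hP : persons.filter (fun p => decide (0 ≤ p.1 ∧ p.1 < N ∧ 0 ≤ p.2 ∧ p.2 < N)) = []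
  · show _ = if persons.filter _ = [] then _ else _
    rw [if_pos hP]
    apply List.findSome?_eq_none_iff.mpr
    intro a _
    apply List.findSome?_eq_none_iff.mpr
    intro sy hsy
    rw [PySem.List.mem_pyRange_one] at hsy
    apply List.findSome?_eq_none_iff.mpr
    intro sx hsx
    rw [PySem.List.mem_pyRange_one] at hsx
    show (if ¬ (0 ≤ sy + a ∧ sy + a < N ∧ 0 ≤ sx + a ∧ sx + a < N) then none
      else aScanY persons ep ((sy, sx), (sy + a, sx + a)) sx (sx + a)
        (PySem.List.pyRange sy (sy + a + 1) 1) false false) = none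
    by_cases hb : 0 ≤ sy + a ∧ sy + a < N ∧ 0 ≤ sx + a ∧ sx + a < N
    · rw [if_neg (not_not_intro hb), square_eq, if_neg]
      rintro ⟨-, -, hAny⟩
      rw [filter_any persons N sy sx a (by omega) (by omega) (by omega) (by omega), hP] at hAny
      simp at hAny
    · rw [if_pos hb]
  · show _ = if persons.filter _ = [] then _ else _
    rw [if_neg hP]
    refine Eq.trans (Eq.trans (findSome?_congr_mem (PySem.List.pyRange 1 N 1) _
      (fun a => (PySem.List.pyRange (max 0 (ep.1 - a)) (min ep.1 (N - 1 - a) + 1) 1).findSome? fun sy =>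
        let row := ((persons.filter (fun p => decide (0 ≤ p.1 ∧ p.1 < N ∧ 0 ≤ p.2 ∧ p.2 < N))).filter
          (fun p => decide (sy ≤ p.1 ∧ p.1 ≤ sy + a))).map Prod.snd
        if row = [] then none
        else
          (PySem.List.pyRange (max 0 (ep.2 - a)) (min ep.2 (N - 1 - a) + 1) 1).findSome? fun sx =>
            if row.any (fun px => decide (sx ≤ px ∧ px ≤ sx + a))
            then some ((sy, sx), (sy + a, sx + a)) else none)
      (fun a ha => ?_))
      (findSome?_tail (max 1 ((PySem.List.min? ((persons.filter (fun p => decide (0 ≤ p.1 ∧ p.1 < N ∧ 0 ≤ p.2 ∧ p.2 < N))).map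
        (fun p => max |p.1 - ep.1| |p.2 - ep.2|)) (fun v => v)).getD 0)) N
        (fun a => (PySem.List.pyRange (max 0 (ep.1 - a)) (min ep.1 (N - 1 - a) + 1) 1).findSome? fun sy =>
        let row := ((persons.filter (fun p => decide (0 ≤ p.1 ∧ p.1 < N ∧ 0 ≤ p.2 ∧ p.2 < N))).filter
          (fun p => decide (sy ≤ p.1 ∧ p.1 ≤ sy + a))).map Prod.snd
        if row = [] then none
        else
          (PySem.List.pyRange (max 0 (ep.2 - a)) (min ep.2 (N - 1 - a) + 1) 1).findSome? fun sx =>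
            if row.any (fun px => decide (sx ≤ px ∧ px ≤ sx + a))
            then some ((sy, sx), (sy + a, sx + a)) else none)
        (le_max_left 1 _) (fun a h1a h2a h3a => ?_))) rfl
    -- per-amount equality of the two forms
    · rename_i ha
      rw [PySem.List.mem_pyRange_one] at ha
      rw [amountA_eq persons ep N a (by omega) (by omega)]
      refine Eq.trans (findSome?_window N (max 0 (ep.1 - a)) (min ep.1 (N - 1 - a) + 1)
        (fun sy => (PySem.List.pyRange 0 (N - a) 1).findSome? fun sx =>
          if (sx ≤ ep.2 ∧ ep.2 ≤ sx + a) ∧ persons.any (bInSquare sy sx a)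
          then some ((sy, sx), (sy + a, sx + a)) else none)
        (fun sy => sy + a < N ∧ sy ≤ ep.1 ∧ ep.1 ≤ sy + a)
        (by omega) (by omega) (fun s h1 h2 => by omega)) ?_
      apply findSome?_congr_mem
      intro sy hsy
      rw [PySem.List.mem_pyRange_one] at hsy
      have hsplit : ∀ sx : Int,
          (if (sx ≤ ep.2 ∧ ep.2 ≤ sx + a) ∧ persons.any (bInSquare sy sx a)
           then some ((sy, sx), (sy + a, sx + a)) else none) =
          (if sx ≤ ep.2 ∧ ep.2 ≤ sx + a then
            (if persons.any (bInSquare sy sx a)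
             then some ((sy, sx), (sy + a, sx + a)) else none) else none) := by
        intro sx
        by_cases h1 : sx ≤ ep.2 ∧ ep.2 ≤ sx + a <;>
          by_cases h2 : persons.any (bInSquare sy sx a) = true <;>
          simp [h1, h2]
      rw [findSome?_congr_mem _ _ _ (fun sx _ => hsplit sx)]
      refine Eq.trans (findSome?_window (N - a) (max 0 (ep.2 - a)) (min ep.2 (N - 1 - a) + 1)
        (fun sx => if persons.any (bInSquare sy sx a)
          then some ((sy, sx), (sy + a, sx + a)) else none)
        (fun sx => sx ≤ ep.2 ∧ ep.2 ≤ sx + a)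
        (by omega) (by omega) (fun s h1 h2 => by omega)) ?_
      show _ = (if (((persons.filter (fun p => decide (0 ≤ p.1 ∧ p.1 < N ∧ 0 ≤ p.2 ∧ p.2 < N))).filter
            (fun p => decide (sy ≤ p.1 ∧ p.1 ≤ sy + a))).map Prod.snd) = [] then none
        else (PySem.List.pyRange (max 0 (ep.2 - a)) (min ep.2 (N - 1 - a) + 1) 1).findSome? fun sx =>
          if (((persons.filter (fun p => decide (0 ≤ p.1 ∧ p.1 < N ∧ 0 ≤ p.2 ∧ p.2 < N))).filter
              (fun p => decide (sy ≤ p.1 ∧ p.1 ≤ sy + a))).map Prod.snd).any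
            (fun px => decide (sx ≤ px ∧ px ≤ sx + a))
          then some ((sy, sx), (sy + a, sx + a)) else none)
      by_cases hrow : (((persons.filter (fun p => decide (0 ≤ p.1 ∧ p.1 < N ∧ 0 ≤ p.2 ∧ p.2 < N))).filter
          (fun p => decide (sy ≤ p.1 ∧ p.1 ≤ sy + a))).map Prod.snd) = []
      · rw [if_pos hrow]
        apply List.findSome?_eq_none_iff.mpr
        intro sx hsx
        rw [PySem.List.mem_pyRange_one] at hsx
        rw [if_neg]
        intro hAny
        rw [filter_any persons N sy sx a (by omega) (by omega) (by omega) (by omega),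
          row_any _ sy sx a, hrow] at hAny
        simp at hAny
      · rw [if_neg hrow]
        apply findSome?_congr_mem
        intro sx hsx
        rw [PySem.List.mem_pyRange_one] at hsx
        rw [filter_any persons N sy sx a (by omega) (by omega) (by omega) (by omega),
          row_any _ sy sx a]
    -- amounts below the minimal feasible size find nothing
    · have hfar : ∀ p ∈ persons.filter (fun p => decide (0 ≤ p.1 ∧ p.1 < N ∧ 0 ≤ p.2 ∧ p.2 < N)),
          a < max |p.1 - ep.1| |p.2 - ep.2| := by
        intro p hp
        obtain ⟨m, hm⟩ : ∃ m, PySem.List.min? ((persons.filter (fun p =>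
            decide (0 ≤ p.1 ∧ p.1 < N ∧ 0 ≤ p.2 ∧ p.2 < N))).map
            (fun p => max |p.1 - ep.1| |p.2 - ep.2|)) (fun v => v) = some m := by
          cases hc : PySem.List.min? ((persons.filter (fun p =>
              decide (0 ≤ p.1 ∧ p.1 < N ∧ 0 ≤ p.2 ∧ p.2 < N))).map
              (fun p => max |p.1 - ep.1| |p.2 - ep.2|)) (fun v => v) with
          | none =>
            rw [PySem.List.min?_eq_none_iff] at hc
            exact absurd (List.map_eq_nil_iff.mp hc) hP
          | some m => exact ⟨m, rfl⟩
        have hle := PySem.List.min?_isMin hm (max |p.1 - ep.1| |p.2 - ep.2|)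
          (List.mem_map_of_mem hp)
        rw [hm] at h3a
        simp only [Option.getD_some] at h3a
        omega
      apply List.findSome?_eq_none_iff.mpr
      intro sy hsy
      rw [PySem.List.mem_pyRange_one] at hsy
      show (if (((persons.filter (fun p => decide (0 ≤ p.1 ∧ p.1 < N ∧ 0 ≤ p.2 ∧ p.2 < N))).filter
          (fun p => decide (sy ≤ p.1 ∧ p.1 ≤ sy + a))).map Prod.snd) = [] then none
        else _) = none
      by_cases hrow : (((persons.filter (fun p => decide (0 ≤ p.1 ∧ p.1 < N ∧ 0 ≤ p.2 ∧ p.2 < N))).filter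
          (fun p => decide (sy ≤ p.1 ∧ p.1 ≤ sy + a))).map Prod.snd) = []
      · rw [if_pos hrow]
      · rw [if_neg hrow]
        apply List.findSome?_eq_none_iff.mpr
        intro sx hsx
        rw [PySem.List.mem_pyRange_one] at hsx
        rw [if_neg]
        intro hAny
        simp only [List.any_eq_true, List.mem_map, List.mem_filter, decide_eq_true_eq] at hAny
        obtain ⟨px, ⟨p, ⟨hp2, hy1, hy2⟩, hpx⟩, hx1, hx2⟩ := hAny
        have hmax := hfar p (List.mem_filter.mpr ⟨hp2.1, by simp [hp2.2]⟩)
        have hab1 : |p.1 - ep.1| ≤ a := abs_le.mpr ⟨by omega, by omega⟩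
        have hab2 : |p.2 - ep.2| ≤ a := abs_le.mpr ⟨by omega, by omega⟩
        have := max_le hab1 hab2
        omega
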